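-- pv_equiv track=rewrite | github.com/aniaodoj66/WDI | zbiór zadań/zad67.py | dzielenie
-- ===== SOURCE A (Python) =====
-- def dzielenie(x, y, n):
--     t = [0 for _ in range(n + 1)]
--     for i in range(len(t)):
--         cc = x // y
--         t[i] = cc
--         od = cc * y
--         x = (x - od) * 10
--     return t
-- ===== SOURCE B (Python) =====
-- def dzielenie(x, y, n):
--     # each digit independently from x, y and a modular power of ten; no running remainder
--     return [x // y if i == 0
--             else 10 * ((x * pow(10, i - 1, y)) % y) // y
--             for i in range(n + 1)]
-- ===== Notes on version B (the rewrite author's own statement) =====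
-- stated objective: alternative
-- what changed: Replaces the stateful long-division loop (running remainder threaded through iterations, mutating a preallocated list) with a comprehension computing each digit independently from x, y and a modular power of ten: digit i = 10*((x*pow(10,i-1,y)) % y) // y; no state crosses iterations.
import Mathlib
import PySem

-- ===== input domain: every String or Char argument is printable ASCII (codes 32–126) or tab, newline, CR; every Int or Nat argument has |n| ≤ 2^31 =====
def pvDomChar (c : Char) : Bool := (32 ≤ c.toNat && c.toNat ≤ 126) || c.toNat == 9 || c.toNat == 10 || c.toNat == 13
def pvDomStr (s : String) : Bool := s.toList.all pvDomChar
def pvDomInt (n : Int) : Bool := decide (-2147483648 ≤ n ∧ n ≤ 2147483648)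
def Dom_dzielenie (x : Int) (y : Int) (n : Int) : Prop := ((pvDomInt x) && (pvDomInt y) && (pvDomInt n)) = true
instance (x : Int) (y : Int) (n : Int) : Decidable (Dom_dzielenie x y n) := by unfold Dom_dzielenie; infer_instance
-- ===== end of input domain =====

-- B replaces A's stateful remainder-threading long-division loop by a per-index closed-form
-- digit formula via a modular power of ten (alternative decomposition); proved equal on Pre_.


-- ===== PORT A =====
-- literal transliteration: preallocate t = [0]*(n+1), then loop over range(len(t))
-- threading (t, x) as state, setting t[i] and updating the remainder x
def dzielenie (x : Int) (y : Int) (n : Int) : List Int :=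
  let t : List Int := (PySem.List.pyRange 0 (n + 1) 1).map (fun _ => (0 : Int))
  ((PySem.List.pyRange 0 (t.length : Int) 1).foldl
    (fun (st : List Int × Int) i =>
      let cc := PySem.Int.floordiv st.2 y
      let t' := st.1.set i.toNat cc
      let od := cc * y
      (t', (st.2 - od) * 10)) (t, x)).1

-- ===== PORT B =====
-- comprehension: each digit from the closed form, no running remainder
-- pow(10, i-1, y) is ported as (10 ^ (i-1)) % y via PySem.Int.mod: exact for the exponents
-- i-1 ≥ 0 that occur here and y ≠ 0 (Python's three-argument pow)
def dzielenie_alt (x : Int) (y : Int) (n : Int) : List Int :=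
  (PySem.List.pyRange 0 (n + 1) 1).map (fun i =>
    if i = 0 then PySem.Int.floordiv x y
    else PySem.Int.floordiv
      (10 * PySem.Int.mod (x * PySem.Int.mod ((10 : Int) ^ (i - 1).toNat) y) y) y)

-- ===== PRECONDITION & SPEC =====
-- Python A raises ZeroDivisionError exactly when y == 0 and the loop runs (n + 1 > 0);
-- Pre_ excludes precisely those inputs and admits every input A returns on.
def Pre_dzielenie (x : Int) (y : Int) (n : Int) : Prop := y ≠ 0 ∨ n + 1 ≤ 0
instance (x : Int) (y : Int) (n : Int) : Decidable (Pre_dzielenie x y n) := by unfold Pre_dzielenie; infer_instance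
def pvWitness_dzielenie : Int × Int × Int := (7, 3, 4)

def Spec_dzielenie (x : Int) (y : Int) (n : Int) (out : List Int) : Prop := out = dzielenie_alt x y n
instance (x : Int) (y : Int) (n : Int) (out : List Int) : Decidable (Spec_dzielenie x y n out) := by unfold Spec_dzielenie; infer_instance

-- ===== CLAIM (what is proved, stated in full; the proofs are below) =====
def Claim_equal_dzielenie : Prop := ∀ (x : Int) (y : Int) (n : Int), Dom_dzielenie x y n → Pre_dzielenie x y n → Spec_dzielenie x y n (dzielenie x y n)

-- ===== LEMMAS AND PROOFS =====

-- the remainder A threads through its loop, as a recurrence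
def pvRem (x y : Int) : Nat → Int
  | 0 => x
  | k + 1 => (pvRem x y k - PySem.Int.floordiv (pvRem x y k) y * y) * 10

-- the k-th digit, B's closed form restated over Nat indices
def pvDig (x y : Int) (k : Nat) : Int :=
  if k = 0 then PySem.Int.floordiv x y
  else PySem.Int.floordiv (x * 10 ^ k) y - 10 * PySem.Int.floordiv (x * 10 ^ (k - 1)) y

theorem pvRem_formula (x y : Int) (hy : y ≠ 0) (k : Nat) :
    pvRem x y (k + 1) = x * 10 ^ (k + 1) - 10 * y * PySem.Int.floordiv (x * 10 ^ k) y := by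
  induction k with
  | zero => simp [pvRem, PySem.Int.floordiv]; ring
  | succ k ih =>
    have hstep : PySem.Int.floordiv (pvRem x y (k + 1)) y
        = PySem.Int.floordiv (x * 10 ^ (k + 1)) y - 10 * PySem.Int.floordiv (x * 10 ^ k) y := by
      rw [ih]
      show (x * 10 ^ (k + 1) - 10 * y * Int.fdiv (x * 10 ^ k) y).fdiv y = _
      have : x * 10 ^ (k + 1) - 10 * y * Int.fdiv (x * 10 ^ k) y
          = x * 10 ^ (k + 1) + (-(10 * Int.fdiv (x * 10 ^ k) y)) * y := by ring
      rw [this, Int.add_mul_fdiv_right _ _ hy]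
      show _ = Int.fdiv (x * 10 ^ (k+1)) y - 10 * Int.fdiv (x * 10 ^ k) y
      ring
    show (pvRem x y (k + 1) - PySem.Int.floordiv (pvRem x y (k + 1)) y * y) * 10 = _
    rw [hstep, ih]; ring

theorem pvDig_eq (x y : Int) (hy : y ≠ 0) (k : Nat) :
    PySem.Int.floordiv (pvRem x y k) y = pvDig x y k := by
  cases k with
  | zero => simp [pvRem, pvDig]
  | succ k =>
    rw [pvRem_formula x y hy k]
    show (x * 10 ^ (k + 1) - 10 * y * Int.fdiv (x * 10 ^ k) y).fdiv y = _
    have : x * 10 ^ (k + 1) - 10 * y * Int.fdiv (x * 10 ^ k) y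
        = x * 10 ^ (k + 1) + (-(10 * Int.fdiv (x * 10 ^ k) y)) * y := by ring
    rw [this, Int.add_mul_fdiv_right _ _ hy]
    simp only [pvDig, Nat.succ_ne_zero, if_false, Nat.add_sub_cancel, PySem.Int.floordiv]
    ring

-- A's loop over the first k indices fills the first k slots with digits, leaving zeros after
theorem pvFold_inv (x y : Int) (hy : y ≠ 0) (M k : Nat) (hk : k ≤ M) :
    (List.range k).foldl
      (fun (st : List Int × Int) (i : Nat) =>
        (st.1.set i (PySem.Int.floordiv st.2 y),
         (st.2 - PySem.Int.floordiv st.2 y * y) * 10))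
      (List.replicate M (0 : Int), x)
    = ((List.range k).map (pvDig x y) ++ List.replicate (M - k) (0 : Int), pvRem x y k) := by
  induction k with
  | zero => simp [pvRem]
  | succ k ih =>
    have hk' : k ≤ M := Nat.le_of_succ_le hk
    rw [List.range_succ, List.foldl_append, ih hk']
    simp only [List.foldl_cons, List.foldl_nil]
    have hlen : ((List.range k).map (pvDig x y)).length = k := by simp
    have hMk : M - k = (M - (k + 1)) + 1 := by omega
    refine Prod.ext ?_ ?_
    · rw [List.set_append]
      simp only [hlen]
      rw [if_neg (lt_irrefl k), Nat.sub_self]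
      rw [hMk, List.replicate_succ, List.set_cons_zero]
      rw [List.map_append]
      simp [pvDig_eq x y hy k]
    · rfl

theorem pvDig_modform (x y : Int) (hy : y ≠ 0) (k : Nat) :
    PySem.Int.floordiv (10 * PySem.Int.mod (x * PySem.Int.mod ((10 : Int) ^ k) y) y) y
      = pvDig x y (k + 1) := by
  show (10 * (x * ((10 : Int) ^ k).fmod y).fmod y).fdiv y = _
  have h1 : (x * ((10 : Int) ^ k).fmod y).fmod y = (x * 10 ^ k).fmod y := by
    have h : x * ((10 : Int) ^ k).fmod y = x * 10 ^ k + (-(x * ((10 : Int) ^ k).fdiv y)) * y := by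
      rw [Int.fmod_def]; ring
    rw [h, Int.add_mul_fmod_self_right]
  rw [h1]
  have h2 : 10 * (x * 10 ^ k).fmod y = x * 10 ^ (k + 1) + (-(10 * (x * 10 ^ k).fdiv y)) * y := by
    rw [Int.fmod_def]; ring
  rw [h2, Int.add_mul_fdiv_right _ _ hy]
  simp only [pvDig, Nat.succ_ne_zero, if_false, Nat.add_sub_cancel, PySem.Int.floordiv]
  ring

theorem pvRange_cast (b : Int) :
    PySem.List.pyRange 0 b 1 = (List.range b.toNat).map (fun k : Nat => (k : Int)) := by
  rw [PySem.List.pyRange_one]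
  simp only [Int.sub_zero]
  apply List.map_congr_left
  intro k _
  omega

theorem dzielenie_eq (x y n : Int) (hy : y ≠ 0) : dzielenie x y n = dzielenie_alt x y n := by
  unfold dzielenie dzielenie_alt
  rw [pvRange_cast (n + 1)]
  set m : Nat := (n + 1).toNat with hm
  simp only [List.map_map, List.length_map, List.length_range]
  rw [pvRange_cast (m : Int)]
  simp only [Int.toNat_natCast, List.foldl_map]
  have hconst : (List.range m).map ((fun _ => (0 : Int)) ∘ (fun k : Nat => (k : Int)))
      = List.replicate m (0 : Int) := by
    simp [List.eq_replicate_iff]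
  rw [hconst]
  rw [pvFold_inv x y hy m m le_rfl]
  simp only [Nat.sub_self, List.replicate_zero, List.append_nil]
  apply List.map_congr_left
  intro k _
  simp only [Function.comp]
  by_cases h : k = 0
  · simp [h, pvDig]
  · have h0 : ((k : Int)) ≠ 0 := by exact_mod_cast h
    rw [if_neg h0]
    have h2 : ((k : Int) - 1).toNat = k - 1 := by omega
    have h3 : k - 1 + 1 = k := Nat.succ_pred_eq_of_pos (Nat.pos_of_ne_zero h)
    rw [h2]
    have h4 := pvDig_modform x y hy (k - 1)
    rw [h3] at h4
    exact h4.symm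

theorem dzielenie_nil (x y n : Int) (hn : n + 1 ≤ 0) : dzielenie x y n = dzielenie_alt x y n := by
  unfold dzielenie dzielenie_alt
  rw [PySem.List.pyRange_one_eq_nil (show (n + 1 : Int) ≤ 0 from hn)]
  simp [PySem.List.pyRange_one_eq_nil (le_refl (0 : Int))]

-- ===== VERDICT (by name: the statement is the Claim_ definition above) =====
theorem dzielenie_spec : Claim_equal_dzielenie := by
  intro x y n _ hpre
  unfold Spec_dzielenie
  rcases hpre with hy | hn
  · exact dzielenie_eq x y n hy
  · exact dzielenie_nil x y n hn
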